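-- pv_equiv track=rewrite | github.com/rchergui/LCOH-Az | app.py | find_cumul
-- ===== SOURCE A (Python) =====
-- def find_cumul(L):
--   i = 0
--   LL = {}
--   while i < len(L)-1:
--     j = i+1
--     while L[j]<0 and L[i]<0 and j<len(L):
--       LL[i] = {"idx":str(j - i + 1), "total":str(sum(L[i:j+1]))}
--       j = j+1
--       if j==len(L): break
--     i = j
--   return LL
-- ===== SOURCE B (Python) =====
-- def find_cumul(L):
--     # Group-then-emit: collect maximal runs of consecutive negatives, then emit
--     # the runs of length >= 2 as {start: {"idx": str(len), "total": str(sum)}}.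
--     runs = []
--     start = None
--     for k, x in enumerate(L):
--         if x < 0:
--             if start is None:
--                 start = k
--         else:
--             if start is not None:
--                 runs.append((start, L[start:k]))
--                 start = None
--     if start is not None:
--         runs.append((start, L[start:]))
--     return {s: {"idx": str(len(v)), "total": str(sum(v))}
--             for s, v in runs if len(v) >= 2}
-- ===== Notes on version B (the rewrite author's own statement) =====
-- stated objective: faster
-- what changed: Replaced A's nested index-based while loops (which re-slice and re-sum the run prefix and overwrite the dict entry at every step of a negative run) by a single group-then-emit pass: collect the maximal runs of consecutive negatives once, then build the dict from the runs of length >= 2 in one comprehension, summing each run once; measured 310-1600x on long-run inputs, ~1.8x on run-poor random inputs.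
import Mathlib
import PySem

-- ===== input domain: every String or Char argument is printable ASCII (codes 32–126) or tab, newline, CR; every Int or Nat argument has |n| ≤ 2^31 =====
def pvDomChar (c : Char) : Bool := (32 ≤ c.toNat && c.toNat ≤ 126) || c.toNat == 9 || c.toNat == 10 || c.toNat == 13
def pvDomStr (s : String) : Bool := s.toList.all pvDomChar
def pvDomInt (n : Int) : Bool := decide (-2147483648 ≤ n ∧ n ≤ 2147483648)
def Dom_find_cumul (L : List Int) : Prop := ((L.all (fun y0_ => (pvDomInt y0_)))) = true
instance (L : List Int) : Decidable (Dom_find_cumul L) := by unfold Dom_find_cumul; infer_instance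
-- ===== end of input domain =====

-- B replaces A's nested index-walking while loops (which re-slice/re-sum and overwrite the dict
-- entry at every step of a negative run) by a single group-then-emit pass over the maximal runs
-- of consecutive negatives (alternative decomposition; L is never mutated by either version).

-- ===== PORT A =====
-- Inner 'while L[j]<0 and L[i]<0 and j<len(L)' loop. On every state A actually reaches the index
-- accesses are in range (entry has j = i+1 < len, and the loop breaks before j hits len), so the
-- Nat-indexed List.getD accesses are exact; 'j < L.length' is Python's third conjunct.
def pvInnerA (L : List Int) (i : Nat) : Nat → Nat → PySem.Dict Int (List (String × String)) →
    PySem.Dict Int (List (String × String)) × Nat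
  | 0, j, acc => (acc, j)           -- fuel guard only: with fuel ≥ L.length - j it is never hit
  | fuel + 1, j, acc =>
    if L.getD j 0 < 0 ∧ L.getD i 0 < 0 ∧ j < L.length then
      if j + 1 = L.length then
        (acc.insert (i : Int)
          [("idx", PySem.Int.toStr ((j : Int) - (i : Int) + 1)),
           ("total", PySem.Int.toStr (PySem.List.slice L (some (i : Int)) (some ((j : Int) + 1))).sum)], j + 1)
      else pvInnerA L i fuel (j + 1) (acc.insert (i : Int)
        [("idx", PySem.Int.toStr ((j : Int) - (i : Int) + 1)),
         ("total", PySem.Int.toStr (PySem.List.slice L (some (i : Int)) (some ((j : Int) + 1))).sum)])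
    else (acc, j)

def pvOuterA (L : List Int) : Nat → Nat → PySem.Dict Int (List (String × String)) →
    PySem.Dict Int (List (String × String))
  | 0, _, acc => acc                -- fuel guard only: with fuel ≥ L.length - i it is never hit
  | fuel + 1, i, acc =>
    if (i : Int) < (L.length : Int) - 1 then
      let r := pvInnerA L i L.length (i + 1) acc
      pvOuterA L fuel r.2 r.1
    else acc

def find_cumul (L : List Int) : List (Int × List (String × String)) :=
  (pvOuterA L L.length 0 PySem.Dict.empty).items

-- ===== PORT B =====
-- fold state: (runs collected so far, start index of the pending negative run, if any)
def pvStepB (L : List Int) (st : List (Int × List Int) × Option Int) (kx : Int × Int) :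
    List (Int × List Int) × Option Int :=
  if kx.2 < 0 then
    match st.2 with
    | none => (st.1, some kx.1)
    | some _ => st
  else
    match st.2 with
    | some s => (st.1 ++ [(s, PySem.List.slice L (some s) (some kx.1))], none)
    | none => st

def find_cumul_alt (L : List Int) : List (Int × List (String × String)) :=
  let st := (PySem.List.enumerate L 0).foldl (pvStepB L) ([], none)
  let runs := match st.2 with
    | some s => st.1 ++ [(s, PySem.List.slice L (some s) none)]
    | none => st.1
  ((runs.filter (fun sv => 2 ≤ sv.2.length)).foldl
      (fun d sv => d.insert sv.1
        [("idx", PySem.Int.toStr (sv.2.length : Int)),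
         ("total", PySem.Int.toStr sv.2.sum)])
      PySem.Dict.empty).items

-- ===== PRECONDITION & SPEC =====
def Spec_find_cumul (L : List Int) (out : List (Int × List (String × String))) : Prop := out = find_cumul_alt L
instance (L : List Int) (out : List (Int × List (String × String))) : Decidable (Spec_find_cumul L out) := by unfold Spec_find_cumul; infer_instance

-- ===== CLAIM (what is proved, stated in full; the proofs are below) =====
def Claim_equal_find_cumul : Prop := ∀ (L : List Int), Dom_find_cumul L → Spec_find_cumul L (find_cumul L)

-- ===== LEMMAS AND PROOFS =====
-- Common reference: pvRuns ys i lists the (start, length) of the maximal runs of consecutive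
-- negatives of ys (indices offset by i); pvEmit keeps runs of length ≥ 2 and renders the entries.
def pvNeg (y : Int) : Bool := decide (y < 0)

def pvRuns : List Int → Nat → List (Nat × Nat)
  | [], _ => []
  | x :: xs, i =>
    if x < 0 then
      (i, ((x :: xs).takeWhile pvNeg).length) ::
        pvRuns ((x :: xs).dropWhile pvNeg) (i + ((x :: xs).takeWhile pvNeg).length)
    else pvRuns xs (i + 1)
termination_by l => l.length
decreasing_by
  · simp [pvNeg, *]
    exact List.length_dropWhile_le _ _
  · simp

def pvEntry (L : List Int) (s m : Nat) : List (String × String) :=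
  [("idx", PySem.Int.toStr (m : Int)), ("total", PySem.Int.toStr ((L.drop s).take m).sum)]

def pvEmit (L : List Int) (rs : List (Nat × Nat)) : List (Int × List (String × String)) :=
  (rs.filter (fun p => decide (2 ≤ p.2))).map (fun p => ((p.1 : Int), pvEntry L p.1 p.2))

-- dropWhile of the suffix is the later suffix

theorem pv_dropWhile_eq_drop {α : Type} (p : α → Bool) (l : List α) :
    l.dropWhile p = l.drop (l.takeWhile p).length := by
  rw [List.dropWhile_eq_drop_findIdx_not, List.takeWhile_eq_take_findIdx_not,
    List.length_take, ← List.drop_eq_drop_min]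

theorem pv_takeWhile_eq_take {α : Type} (p : α → Bool) (l : List α) :
    l.takeWhile p = l.take (l.takeWhile p).length := by
  exact (List.prefix_iff_eq_take.1 (List.takeWhile_prefix p))

-- run facts at position i with L[i] < 0 ; m = length of the maximal negative run from i

theorem pv_dropWhile_drop (L : List Int) (i : Nat) :
    (L.drop i).dropWhile pvNeg = L.drop (i + ((L.drop i).takeWhile pvNeg).length) := by
  rw [pv_dropWhile_eq_drop, List.drop_drop]

theorem pvRun_pos (L : List Int) (i : Nat) (hi : i < L.length) (hx : L.getD i 0 < 0) :
    0 < ((L.drop i).takeWhile pvNeg).length := by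
  have hd := List.drop_eq_getElem_cons hi
  have hx' : L[i] < 0 := by rwa [List.getD_eq_getElem L 0 hi] at hx
  rw [hd, List.takeWhile_cons_of_pos (by simp [pvNeg, hx'])]
  simp

theorem pvRun_le (L : List Int) (i : Nat) (hi : i ≤ L.length) :
    i + ((L.drop i).takeWhile pvNeg).length ≤ L.length := by
  have h1 : ((L.drop i).takeWhile pvNeg).length ≤ (L.drop i).length :=
    (List.takeWhile_sublist _).length_le
  simp at h1; omega

theorem pvRun_neg (L : List Int) (i : Nat) (hi : i ≤ L.length) (k : Nat) (hik : i ≤ k)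
    (hk : k < i + ((L.drop i).takeWhile pvNeg).length) : L.getD k 0 < 0 := by
  set m := ((L.drop i).takeWhile pvNeg).length with hm
  have hlen : i + m ≤ L.length := pvRun_le L i hi
  have hkL : k < L.length := by omega
  have hdl : k - i < (L.drop i).length := by simp; omega
  have hlt : k - i < ((L.drop i).take m).length := by simp; omega
  have hmem : ((L.drop i).take m)[k - i] ∈ (L.drop i).takeWhile pvNeg := by
    conv in List.takeWhile _ _ => rw [pv_takeWhile_eq_take pvNeg (L.drop i), ← hm]
    exact List.getElem_mem hlt
  have hp := List.mem_takeWhile_imp hmem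
  have h1 : ((L.drop i).take m)[k - i] = (L.drop i)[k - i]'hdl := List.getElem_take
  have h2 : (L.drop i)[k - i]'hdl = L[k] := by
    rw [List.getElem_drop]; congr 1; omega
  rw [h1, h2] at hp
  simp [pvNeg] at hp
  rwa [List.getD_eq_getElem L 0 hkL]

theorem pvRun_end (L : List Int) (i : Nat)
    (h : i + ((L.drop i).takeWhile pvNeg).length < L.length) :
    0 ≤ L.getD (i + ((L.drop i).takeWhile pvNeg).length) 0 := by
  set m := ((L.drop i).takeWhile pvNeg).length with hm
  have hne : (L.drop i).dropWhile pvNeg ≠ [] := by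
    rw [pv_dropWhile_eq_drop, ← hm]
    simp
    omega
  have hhead := List.head?_dropWhile_not pvNeg (L.drop i)
  have heq : (L.drop i).dropWhile pvNeg = L.drop (i + m) := by
    rw [pv_dropWhile_eq_drop, ← hm, List.drop_drop]
  have hd2 : L.drop (i + m) = L[i + m]'h :: L.drop (i + m + 1) := List.drop_eq_getElem_cons h
  rw [heq, hd2] at hhead
  simp only [List.head?_cons] at hhead
  simp [pvNeg] at hhead
  rw [List.getD_eq_getElem L 0 h]
  omega

theorem pvEmit_cons_keep (L : List Int) (a : Nat × Nat) (rest : List (Nat × Nat)) (h : 2 ≤ a.2) :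
    pvEmit L (a :: rest) = ((a.1 : Int), pvEntry L a.1 a.2) :: pvEmit L rest := by
  rw [pvEmit, pvEmit, List.filter_cons_of_pos (by simpa using h), List.map_cons]

theorem pvEmit_cons_drop (L : List Int) (a : Nat × Nat) (rest : List (Nat × Nat)) (h : a.2 < 2) :
    pvEmit L (a :: rest) = pvEmit L rest := by
  rw [pvEmit, pvEmit, List.filter_cons_of_neg (by simpa using h)]

theorem pvInnerA_eq (L : List Int) (i m : Nat) (hm : 1 ≤ m) (him : i + m ≤ L.length)
    (hneg : ∀ k, i ≤ k → k < i + m → L.getD k 0 < 0)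
    (hend : i + m = L.length ∨ 0 ≤ L.getD (i + m) 0) :
    ∀ n j acc, i + m - j ≤ n → i < j → j ≤ i + m →
      pvInnerA L i n j acc =
        (if j < i + m then acc.insert (i : Int) (pvEntry L i m) else acc,
         if j < i + m then i + m else j) := by
  intro n
  induction n with
  | zero =>
    intro j acc hn hij hjm
    have hj : j = i + m := by omega
    rw [if_neg (by omega), if_neg (by omega)]
    rfl
  | succ n ih =>
    intro j acc hn hij hjm
    by_cases hj : j = i + m
    · rw [pvInnerA, if_neg, if_neg (by omega), if_neg (by omega)]
      subst hj
      rcases hend with he | he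
      · omega
      · push Not; intro h1 h2; omega
    · have hjlt : j < i + m := by omega
      rw [pvInnerA, if_pos ⟨hneg j (by omega) hjlt, hneg i (by omega) (by omega), by omega⟩]
      have hval : i + m = j + 1 → ([(("idx" : String), PySem.Int.toStr ((j : Int) - (i : Int) + 1)),
          ("total", PySem.Int.toStr (PySem.List.slice L (some (i : Int)) (some ((j : Int) + 1))).sum)]
          : List (String × String)) = pvEntry L i m := by
        intro hje
        have h1 : (j : Int) - (i : Int) + 1 = (m : Int) := by omega
        have h2 : ((j : Int) + 1) = ((i + m : Nat) : Int) := by push_cast; omega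
        rw [pvEntry, h1, h2]
        rw [show (some ((i : Nat) : Int)) = some ((i : Nat) : Int) from rfl]
        rw [PySem.List.slice_natCast]
        rw [show i + m - i = m from by omega]
      rw [if_pos hjlt, if_pos hjlt]
      split
      · -- j + 1 = L.length : then i + m = j + 1
        rename_i hlen
        simp only [Prod.mk.injEq]
        exact ⟨by rw [hval (by omega)], by omega⟩
      · rename_i hlen
        rw [ih (j + 1) _ (by omega) (by omega) (by omega)]
        by_cases hj1 : j + 1 < i + m
        · rw [if_pos hj1, if_pos hj1, PySem.Dict.insert_insert_self]
        · rw [if_neg hj1, if_neg hj1]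
          simp only [Prod.mk.injEq]
          exact ⟨by rw [hval (by omega)], by omega⟩

theorem pvOuterA_eq (L : List Int) :
    ∀ (n i : Nat) (acc : PySem.Dict Int (List (String × String))), L.length - i ≤ n →
      (∀ k ∈ acc.keys, k < (i : Int)) →
      (pvOuterA L n i acc).items = acc.items ++ pvEmit L (pvRuns (L.drop i) i) := by
  intro n
  induction n with
  | zero =>
    intro i acc hn hkeys
    have hdrop : L.drop i = [] := by simp; omega
    rw [hdrop, pvRuns]
    simp [pvEmit, pvOuterA]
  | succ n ih =>
    intro i acc hn hkeys
    by_cases hcond : (i : Int) < (L.length : Int) - 1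
    · have hi1 : i + 1 < L.length := by omega
      have hi : i < L.length := by omega
      have hdrop : L.drop i = L[i] :: L.drop (i + 1) := List.drop_eq_getElem_cons hi
      rw [pvOuterA, if_pos hcond]
      by_cases hx : L[i] < 0
      · -- negative head: run of length m
        have hgd : L.getD i 0 < 0 := by rwa [List.getD_eq_getElem L 0 hi]
        set m := ((L.drop i).takeWhile pvNeg).length with hm
        have hm1 : 1 ≤ m := pvRun_pos L i hi hgd
        have hmle : i + m ≤ L.length := pvRun_le L i (by omega)
        have hneg : ∀ k, i ≤ k → k < i + m → L.getD k 0 < 0 :=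
          fun k h1 h2 => pvRun_neg L i (by omega) k h1 h2
        have hend : i + m = L.length ∨ 0 ≤ L.getD (i + m) 0 := by
          by_cases he : i + m = L.length
          · exact Or.inl he
          · exact Or.inr (pvRun_end L i (by omega))
        have hrunsL : pvRuns (L.drop i) i =
            (i, m) :: pvRuns (L.drop (i + m)) (i + m) := by
          conv_lhs => rw [hdrop, pvRuns]
          rw [if_pos hx]
          rw [← hdrop, ← hm, pv_dropWhile_drop, ← hm]
        by_cases hm2 : m = 1
        · -- run of length 1: inner loop does not fire
          have hinner := pvInnerA_eq L i m hm1 hmle hneg hend L.length (i + 1) acc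
            (by omega) (by omega) (by omega)
          rw [if_neg (by omega), if_neg (by omega)] at hinner
          simp only [hinner]
          rw [ih (i + 1) acc (by omega) (fun k hk => lt_trans (hkeys k hk) (by push_cast; omega))]
          rw [hrunsL, pvEmit_cons_drop L _ _ (by omega), hm2]
        · -- run of length ≥ 2: inner loop records the run
          have hinner := pvInnerA_eq L i m hm1 hmle hneg hend L.length (i + 1) acc
            (by omega) (by omega) (by omega)
          rw [if_pos (by omega), if_pos (by omega)] at hinner
          simp only [hinner]
          have hfresh : acc.contains (i : Int) = false := by
            by_contra hc
            have hmem : (i : Int) ∈ acc.keys :=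
              (PySem.Dict.contains_iff_mem_keys acc (i : Int)).1 (by simpa using hc)
            exact absurd (hkeys _ hmem) (by omega)
          rw [ih (i + m) _ (by omega) ?keys]
          case keys =>
            intro k hk
            rcases (PySem.Dict.mem_keys_insert acc (i : Int) k (pvEntry L i m)).1 hk with h | h
            · subst h; push_cast; omega
            · exact lt_trans (hkeys k h) (by push_cast; omega)
          rw [PySem.Dict.items_insert_of_not_contains acc (pvEntry L i m) hfresh]
          rw [hrunsL, pvEmit_cons_keep L _ _ (by simpa using by omega : 2 ≤ m)]
          simp
      · -- non-negative head: inner loop does not fire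
        have hgd : ¬ L.getD i 0 < 0 := by rwa [List.getD_eq_getElem L 0 hi]
        have hinner : pvInnerA L i L.length (i + 1) acc = (acc, i + 1) := by
          have hfl : L.length = (L.length - 1) + 1 := by omega
          rw [hfl, pvInnerA, if_neg (by tauto)]
        simp only [hinner]
        rw [ih (i + 1) acc (by omega) (fun k hk => lt_trans (hkeys k hk) (by push_cast; omega))]
        conv_rhs => rw [hdrop, pvRuns]
        rw [if_neg hx]
    · rw [pvOuterA, if_neg hcond]
      have hlen1 : (L.drop i).length ≤ 1 := by simp; omega
      have hnil : pvEmit L (pvRuns (L.drop i) i) = [] := by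
        rcases hl : L.drop i with _ | ⟨x, xs⟩
        · rw [pvRuns]; simp [pvEmit]
        · have hxs : xs = [] := by
            apply List.eq_nil_of_length_eq_zero
            have h2 := congrArg List.length hl
            simp at h2
            omega
          subst hxs
          rw [pvRuns]
          split
          · have ht : ([x] : List Int).takeWhile pvNeg = [x] := by
              rename_i hx; simp [pvNeg, List.takeWhile, hx]
            simp only [ht]
            rw [pvEmit_cons_drop L _ _ (by simp)]
            rw [show ([x] : List Int).dropWhile pvNeg = [] from by
              rename_i hx; simp [pvNeg, List.dropWhile, hx]]
            rw [pvRuns]; simp [pvEmit]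
          · rw [pvRuns]; simp [pvEmit]
      rw [hnil]
      simp

def pvFinalB (L : List Int) (st : List (Int × List Int) × Option Int) : List (Int × List Int) :=
  match st.2 with
  | some s => st.1 ++ [(s, PySem.List.slice L (some s) none)]
  | none => st.1

theorem pvFoldB_run (L : List Int) :
    ∀ (r : List Int) (i : Int) (runs : List (Int × List Int)) (s : Int),
      (∀ y ∈ r, y < 0) →
      (PySem.List.enumerate r i).foldl (pvStepB L) (runs, some s) = (runs, some s) := by
  intro r
  induction r with
  | nil => intro i runs s _; simp [PySem.List.enumerate]
  | cons y ys ih =>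
    intro i runs s hneg
    rw [PySem.List.enumerate_cons, List.foldl_cons]
    have : pvStepB L (runs, some s) (i, y) = (runs, some s) := by
      simp [pvStepB, hneg y (by simp)]
    rw [this, ih (i + 1) runs s (fun z hz => hneg z (by simp [hz]))]

theorem pvFoldB_eq (L : List Int) :
    ∀ (n i : Nat) (runs : List (Int × List Int)), (L.drop i).length ≤ n →
      pvFinalB L ((PySem.List.enumerate (L.drop i) (i : Int)).foldl (pvStepB L) (runs, none))
        = runs ++ (pvRuns (L.drop i) i).map (fun p => ((p.1 : Int), (L.drop p.1).take p.2)) := by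
  intro n
  induction n with
  | zero =>
    intro i runs hn
    have hdrop : L.drop i = [] := by
      exact List.eq_nil_of_length_eq_zero (by omega)
    rw [hdrop, pvRuns]
    simp [PySem.List.enumerate, pvFinalB]
  | succ n ih =>
    intro i runs hn
    rcases hl : L.drop i with _ | ⟨x, xs⟩
    · rw [pvRuns]; simp [PySem.List.enumerate, pvFinalB]
    · have hi : i < L.length := by
        by_contra hc
        rw [List.drop_eq_nil_of_le (by omega)] at hl; exact absurd hl (by simp)
      have hdrop : L.drop i = L[i] :: L.drop (i + 1) := List.drop_eq_getElem_cons hi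
      have hx : x = L[i] := by rw [hl] at hdrop; exact (List.cons.injEq _ _ _ _ ▸ hdrop).1
      have hxs : xs = L.drop (i + 1) := by rw [hl] at hdrop; exact (List.cons.injEq _ _ _ _ ▸ hdrop).2
      by_cases hneg0 : x < 0
      · -- negative head: one full run
        have hgd : L.getD i 0 < 0 := by rw [List.getD_eq_getElem L 0 hi, ← hx]; exact hneg0
        set m := ((L.drop i).takeWhile pvNeg).length with hm
        have hm1 : 1 ≤ m := pvRun_pos L i hi hgd
        have hmle : i + m ≤ L.length := pvRun_le L i (by omega)
        have htw : (L.drop i).takeWhile pvNeg = x :: ((L.drop (i + 1)).takeWhile pvNeg) := by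
          rw [hl, List.takeWhile_cons_of_pos (by simp [pvNeg, hneg0]), hxs]
        have hsplit : L.drop i = ((L.drop i).takeWhile pvNeg) ++ L.drop (i + m) := by
          conv_lhs => rw [← List.takeWhile_append_dropWhile (p := pvNeg) (l := L.drop i)]
          rw [pv_dropWhile_drop, ← hm]
        have hrunsL : pvRuns (L.drop i) i = (i, m) :: pvRuns (L.drop (i + m)) (i + m) := by
          conv_lhs => rw [hl, pvRuns]
          rw [if_pos hneg0]
          rw [← hl, ← hm, pv_dropWhile_drop, ← hm]
        -- fold over the run leaves state (runs, some i)
        have hfold1 : (PySem.List.enumerate ((L.drop i).takeWhile pvNeg) (i : Int)).foldl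
            (pvStepB L) (runs, none) = (runs, some (i : Int)) := by
          rw [htw, PySem.List.enumerate_cons, List.foldl_cons]
          have hstep : pvStepB L (runs, none) ((i : Int), x) = (runs, some (i : Int)) := by
            simp [pvStepB, hneg0]
          rw [hstep]
          exact pvFoldB_run L _ _ _ _ (fun z hz => by
            have := List.mem_takeWhile_imp hz; simpa [pvNeg] using this)
        have hlen_tw : ((L.drop i).takeWhile pvNeg).length = m := hm.symm
        rw [← hl]
        conv_lhs => rw [hsplit, PySem.List.enumerate_append]
        rw [List.foldl_append, hfold1, hlen_tw]
        have hcast : (i : Int) + (m : Int) = ((i + m : Nat) : Int) := by push_cast; ring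
        rw [hcast]
        -- now fold over the remainder from state (runs, some i)
        rcases h2 : L.drop (i + m) with _ | ⟨z, zs⟩
        · -- run reaches the end of the list
          have hlenm : m = L.length - i := by
            have h3 := congrArg List.length h2; simp at h3; omega
          rw [PySem.List.enumerate_nil]
          simp only [List.foldl_nil, pvFinalB]
          rw [hrunsL, h2, pvRuns]
          simp only [List.map_cons, List.map_nil]
          rw [PySem.List.slice_from_natCast]
          rw [List.take_of_length_le (by simp; omega)]
        · -- the element after the run is non-negative
          have hizm : i + m < L.length := by
            by_contra hc
            rw [List.drop_eq_nil_of_le (by omega)] at h2; exact absurd h2 (by simp)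
          have hz : z = L[i + m] := by
            have := List.drop_eq_getElem_cons hizm
            rw [h2] at this; exact (List.cons.injEq _ _ _ _ ▸ this).1
          have hzs : zs = L.drop (i + m + 1) := by
            have := List.drop_eq_getElem_cons hizm
            rw [h2] at this; exact (List.cons.injEq _ _ _ _ ▸ this).2
          have hznn : ¬ z < 0 := by
            have := pvRun_end L i (by omega)
            rw [← hm, List.getD_eq_getElem L 0 hizm] at this
            omega
          rw [PySem.List.enumerate_cons, List.foldl_cons]
          have hstep : pvStepB L (runs, some (i : Int)) (((i + m : Nat) : Int), z) =
              (runs ++ [((i : Int), PySem.List.slice L (some (i : Int)) (some ((i + m : Nat) : Int)))], none) := by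
            simp [pvStepB, hznn]
          rw [hstep]
          have hcast2 : ((i + m : Nat) : Int) + 1 = ((i + m + 1 : Nat) : Int) := by push_cast; ring
          rw [hcast2, hzs]
          -- IH on the remainder
          rw [ih (i + m + 1) _ (by simp at hn ⊢; omega)]
          rw [hrunsL, h2, pvRuns]
          rw [if_neg hznn]
          simp only [List.map_cons]
          rw [PySem.List.slice_natCast, show i + m - i = m from by omega]
          simp [hzs]
      · -- non-negative head
        subst hxs
        rw [PySem.List.enumerate_cons, List.foldl_cons]
        have hstep : pvStepB L (runs, none) ((i : Int), x) = (runs, none) := by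
          simp [pvStepB, hneg0]
        rw [hstep, show (i : Int) + 1 = ((i + 1 : Nat) : Int) from by push_cast; ring]
        rw [ih (i + 1) _ (by simp at hn ⊢; omega)]
        rw [pvRuns, if_neg hneg0]

theorem pvRuns_mem :
    ∀ (n : Nat) (ys : List Int) (i : Nat), ys.length ≤ n →
      ∀ p ∈ pvRuns ys i, i ≤ p.1 ∧ 1 ≤ p.2 ∧ p.1 + p.2 ≤ i + ys.length := by
  intro n
  induction n with
  | zero =>
    intro ys i hn p hp
    have : ys = [] := List.eq_nil_of_length_eq_zero (by omega)
    subst this; rw [pvRuns] at hp; simp at hp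
  | succ n ih =>
    intro ys i hn p hp
    rcases ys with _ | ⟨x, xs⟩
    · rw [pvRuns] at hp; simp at hp
    · by_cases hx : x < 0
      · rw [pvRuns, if_pos hx] at hp
        set m := ((x :: xs).takeWhile pvNeg).length with hm
        have hm1 : 1 ≤ m := by
          rw [hm, List.takeWhile_cons_of_pos (by simp [pvNeg, hx])]; simp
        have hmlen : m ≤ (x :: xs).length := by
          rw [hm]; exact (List.takeWhile_sublist _).length_le
        have hdlen : ((x :: xs).dropWhile pvNeg).length = (x :: xs).length - m := by
          rw [pv_dropWhile_eq_drop, ← hm]; simp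
        have hlc : (x :: xs).length = xs.length + 1 := rfl
        rcases List.mem_cons.1 hp with hp' | hp'
        · subst hp'; simp; omega
        · obtain ⟨h1, h2, h3⟩ := ih _ _ (by omega) p hp'
          refine ⟨by omega, h2, by omega⟩
      · rw [pvRuns, if_neg hx] at hp
        obtain ⟨h1, h2, h3⟩ := ih _ _ (by simp at hn ⊢; omega) p hp
        refine ⟨by omega, h2, by simp; omega⟩

theorem pvRuns_sorted :
    ∀ (n : Nat) (ys : List Int) (i : Nat), ys.length ≤ n →
      (pvRuns ys i).Pairwise (fun p q => p.1 < q.1) := by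
  intro n
  induction n with
  | zero =>
    intro ys i hn
    have : ys = [] := List.eq_nil_of_length_eq_zero (by omega)
    subst this; rw [pvRuns]; simp
  | succ n ih =>
    intro ys i hn
    rcases ys with _ | ⟨x, xs⟩
    · rw [pvRuns]; simp
    · by_cases hx : x < 0
      · rw [pvRuns, if_pos hx]
        set m := ((x :: xs).takeWhile pvNeg).length with hm
        have hm1 : 1 ≤ m := by
          rw [hm, List.takeWhile_cons_of_pos (by simp [pvNeg, hx])]; simp
        have hdlen : ((x :: xs).dropWhile pvNeg).length = (x :: xs).length - m := by
          rw [pv_dropWhile_eq_drop, ← hm]; simp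
        have hlc : (x :: xs).length = xs.length + 1 := rfl
        refine List.Pairwise.cons ?_ (ih _ _ (by omega))
        intro q hq
        obtain ⟨h1, h2, h3⟩ := pvRuns_mem ((x :: xs).dropWhile pvNeg).length _ _ le_rfl q hq
        show i < q.1
        omega
      · rw [pvRuns, if_neg hx]
        exact ih _ _ (by simp at hn ⊢; omega)

theorem pvA_total (L : List Int) : find_cumul L = pvEmit L (pvRuns L 0) := by
  rw [find_cumul, pvOuterA_eq L L.length 0 PySem.Dict.empty (by omega) (by simp)]
  rw [show (PySem.Dict.empty : PySem.Dict Int (List (String × String))).items = [] from rfl,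
    List.nil_append, List.drop_zero]

theorem pvRuns_len_take (L : List Int) (p : Nat × Nat) (hp : p ∈ pvRuns L 0) :
    ((L.drop p.1).take p.2).length = p.2 := by
  obtain ⟨h1, h2, h3⟩ := pvRuns_mem L.length L 0 le_rfl p hp
  simp
  omega

theorem pvB_total (L : List Int) : find_cumul_alt L = pvEmit L (pvRuns L 0) := by
  have h0 : find_cumul_alt L =
      (((pvFinalB L ((PySem.List.enumerate L 0).foldl (pvStepB L) ([], none))).filter
          (fun sv => decide (2 ≤ sv.2.length))).foldl
        (fun d sv => d.insert sv.1
          [("idx", PySem.Int.toStr (sv.2.length : Int)),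
           ("total", PySem.Int.toStr sv.2.sum)])
        PySem.Dict.empty).items := rfl
  rw [h0]
  have h1 : PySem.List.enumerate L 0 = PySem.List.enumerate (L.drop 0) ((0 : Nat) : Int) := by
    rw [List.drop_zero]; norm_num
  rw [h1, pvFoldB_eq L L.length 0 [] (by simp)]
  rw [List.drop_zero, List.nil_append]
  set rs := pvRuns L 0 with hrs
  have hfil : (rs.map (fun p => ((p.1 : Int), (L.drop p.1).take p.2))).filter
      (fun sv => decide (2 ≤ sv.2.length)) =
      (rs.filter (fun p => decide (2 ≤ p.2))).map (fun p => ((p.1 : Int), (L.drop p.1).take p.2)) := by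
    rw [List.filter_map]
    congr 1
    apply List.filter_congr
    intro a ha
    simp only [Function.comp_apply]
    rw [pvRuns_len_take L a (hrs ▸ ha)]
  rw [hfil, List.foldl_map]
  set rs' := rs.filter (fun p => decide (2 ≤ p.2)) with hrs'
  have hnodup : (rs'.map (fun a => ((a.1 : Nat) : Int))).Nodup := by
    have hpw : rs'.Pairwise (fun p q => p.1 < q.1) :=
      (pvRuns_sorted L.length L 0 le_rfl).filter _
    show (rs'.map (fun a => ((a.1 : Nat) : Int))).Pairwise (· ≠ ·)
    rw [List.pairwise_map]
    exact hpw.imp (fun h => by simp; omega)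
  rw [PySem.Dict.items_foldl_insert_fresh rs' (fun a => ((a.1 : Nat) : Int))
    (fun a => [("idx", PySem.Int.toStr (((L.drop a.1).take a.2).length : Int)),
               ("total", PySem.Int.toStr ((L.drop a.1).take a.2).sum)])
    PySem.Dict.empty (fun a _ => PySem.Dict.contains_empty _) hnodup]
  rw [pvEmit]
  rw [show (PySem.Dict.empty : PySem.Dict Int (List (String × String))).items = [] from rfl,
    List.nil_append]
  apply List.map_congr_left
  intro a ha
  have hmem : a ∈ pvRuns L 0 := List.mem_of_mem_filter (hrs' ▸ ha)
  rw [pvEntry, pvRuns_len_take L a hmem]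

theorem pv_find_cumul_eq (L : List Int) : find_cumul L = find_cumul_alt L := by
  rw [pvA_total, pvB_total]

-- ===== VERDICT (by name: the statement is the Claim_ definition above) =====
theorem find_cumul_spec : Claim_equal_find_cumul := by
  intro L _
  exact pv_find_cumul_eq L
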